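-- pv_equiv track=rewrite | github.com/werserk/NTO-AI-4th-place | ocr/postprocessing.py | get_postfix
-- ===== SOURCE A (Python) =====
-- from string import punctuation, digits, whitespace
--
-- not_letters = punctuation + digits + whitespace
--
-- def get_postfix(word):
--     postfix_start = len(word)
--     for i in range(len(word) - 1, -1, -1):
--         char = word[i]
--         if char in not_letters:
--             postfix_start -= 1
--         else:
--             break
--     return postfix_start
-- ===== SOURCE B (Python) =====
-- from string import punctuation, digits, whitespace
--
-- not_letters = punctuation + digits + whitespace
--
-- def get_postfix(word):
--     # Forward pass: the postfix of non-letters starts right after the last letter.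
--     last = 0
--     for i, ch in enumerate(word):
--         if ch not in not_letters:
--             last = i + 1
--     return last
-- ===== Notes on version B (the rewrite author's own statement) =====
-- stated objective: alternative
-- what changed: Replaces A's backward scan with early break over the trailing run by a forward whole-string pass that tracks the position just after the last letter seen, with no counter decrement and no break.
import Mathlib
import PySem

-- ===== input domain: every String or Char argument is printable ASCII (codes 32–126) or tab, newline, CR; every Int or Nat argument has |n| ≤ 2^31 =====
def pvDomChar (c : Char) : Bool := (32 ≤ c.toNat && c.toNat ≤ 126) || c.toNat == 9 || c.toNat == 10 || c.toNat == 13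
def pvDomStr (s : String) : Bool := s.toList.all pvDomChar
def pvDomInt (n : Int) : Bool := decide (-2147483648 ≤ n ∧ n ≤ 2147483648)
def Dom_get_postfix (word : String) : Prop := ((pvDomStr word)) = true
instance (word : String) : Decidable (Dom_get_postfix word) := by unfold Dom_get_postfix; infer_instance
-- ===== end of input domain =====

-- B replaces A's backward scan-with-break by a forward whole-string pass that tracks
-- the position just after the last letter seen (same cost, different traversal).

-- not_letters = punctuation + digits + whitespace (string module constants, in that order)
def notLetters : List Char := ("!\"#$%&'()*+,-./:;<=>?@[\\]^_`{|}~" ++ "0123456789" ++ " \t\n\r\u000B\u000C").toList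

-- ===== PORT A =====
-- backward for-loop over i = len-1 … 0 with break, modelled as recursion on the index bound
def getPostfixLoop (chars : List Char) (i : Nat) (acc : Int) : Int :=
  match i with
  | 0 => acc
  | Nat.succ j =>
      if chars.getD j ' ' ∈ notLetters then getPostfixLoop chars j (acc - 1) else acc

def get_postfix (word : String) : Int :=
  getPostfixLoop word.toList word.toList.length (word.toList.length : Int)

-- ===== PORT B =====
-- forward pass: 'for i, ch in enumerate(word): if ch not in not_letters: last = i + 1'
def get_postfix_alt (word : String) : Int :=
  (PySem.List.enumerate word.toList 0).foldl
    (fun last p => if p.2 ∈ notLetters then last else p.1 + 1) 0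

-- ===== PRECONDITION & SPEC =====
def Spec_get_postfix (word : String) (out : Int) : Prop := out = get_postfix_alt word
instance (word : String) (out : Int) : Decidable (Spec_get_postfix word out) := by unfold Spec_get_postfix; infer_instance

-- ===== CLAIM (what is proved, stated in full; the proofs are below) =====
def Claim_equal_get_postfix : Prop := ∀ (word : String), Dom_get_postfix word → Spec_get_postfix word (get_postfix word)

-- ===== LEMMAS AND PROOFS =====

-- A's loop subtracts the length of the trailing not_letters run of the first i chars
theorem getPostfixLoop_eq (l : List Char) (acc : Int) :
    ∀ i, i ≤ l.length →
      getPostfixLoop l i acc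
        = acc - (((l.take i).reverse.takeWhile (fun c => decide (c ∈ notLetters))).length : Int) := by
  intro i
  induction i generalizing acc with
  | zero => intro _; simp [getPostfixLoop]
  | succ j ih =>
      intro hij
      have hj : j < l.length := Nat.lt_of_succ_le hij
      have htake : (l.take (j + 1)).reverse = l[j] :: (l.take j).reverse := by
        rw [List.take_add_one]
        simp [List.getElem?_eq_getElem hj]
      have hgetD : l.getD j ' ' = l[j] := by
        simp [List.getD, List.getElem?_eq_getElem hj]
      rw [getPostfixLoop, hgetD, htake]
      by_cases h : l[j] ∈ notLetters
      · simp only [h, if_true]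
        rw [ih (acc - 1) (Nat.le_of_lt hj), List.takeWhile_cons]
        simp [h]
        ring
      · simp only [h, if_false]
        rw [List.takeWhile_cons]
        simp [h]

-- B's forward fold computes len minus the trailing not_letters run length
theorem foldB_eq (l : List Char) :
    (PySem.List.enumerate l 0).foldl
        (fun last p => if p.2 ∈ notLetters then last else p.1 + 1) 0
      = (l.length : Int) - ((l.reverse.takeWhile (fun c => decide (c ∈ notLetters))).length : Int) := by
  induction l using List.reverseRecOn with
  | nil => simp [PySem.List.enumerate]
  | append_singleton xs c ih =>
      rw [PySem.List.enumerate_append, List.foldl_append, ih]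
      by_cases h : c ∈ notLetters
      · simp [PySem.List.enumerate, h]
      · simp [PySem.List.enumerate, h]

-- ===== VERDICT (by name: the statement is the Claim_ definition above) =====
theorem get_postfix_spec : Claim_equal_get_postfix := by
  intro word _
  unfold Spec_get_postfix get_postfix get_postfix_alt
  rw [getPostfixLoop_eq _ _ _ (Nat.le_refl _), List.take_length, foldB_eq]
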